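-- pv_equiv track=rewrite | github.com/micheloosterhof/aldegonde | src/aldegonde/rail.py | scytale_encrypt
-- ===== SOURCE A (Python) =====
-- def scytale_encrypt(ciphertext: str, key: int) -> str:
--     """
--     This function receives cipher-text and key and returns the original
--     text after decryption
--     """
--     scytale: list[list[str]] = [["\n" for _i in ciphertext] for _j in range(key)]
--
--     # create the scytale matrix and fill with *'s
--     for col in range(len(ciphertext)):
--         scytale[col % key][col] = "*"
--
--     # now we can fill the scytale matrix with ciphertext values
--     index = 0
--     for i in range(key):
--         for j in range(len(ciphertext)):
--             if (scytale[i][j] == "*") and (index < len(ciphertext)):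
--                 scytale[i][j] = ciphertext[index]
--                 index += 1
--
--     result = []
--     for col in range(len(ciphertext)):
--         result.append(scytale[col % key][col])
--
--     return "".join(result)
-- ===== SOURCE B (Python) =====
-- def scytale_encrypt(ciphertext: str, key: int) -> str:
--     # Closed-form permutation: row i (= col % key) starts at offset i*q + min(i, r)
--     # in the plaintext, and column col reads the (col // key)-th char of its row.
--     n = len(ciphertext)
--     if n == 0:
--         return ""
--     q, r = divmod(n, key)
--     out = []
--     for col in range(n):
--         i = col % key
--         out.append(ciphertext[i * q + min(i, r) + col // key])
--     return "".join(out)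
-- ===== Notes on version B (the rewrite author's own statement) =====
-- stated objective: faster
-- what changed: B replaces A's key-by-n matrix (built, star-marked, filled row by row, then re-read column-wise) with the closed-form permutation index (col % key)*q + min(col % key, n % key) + col//key computed in a single pass over the text.
import Mathlib
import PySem

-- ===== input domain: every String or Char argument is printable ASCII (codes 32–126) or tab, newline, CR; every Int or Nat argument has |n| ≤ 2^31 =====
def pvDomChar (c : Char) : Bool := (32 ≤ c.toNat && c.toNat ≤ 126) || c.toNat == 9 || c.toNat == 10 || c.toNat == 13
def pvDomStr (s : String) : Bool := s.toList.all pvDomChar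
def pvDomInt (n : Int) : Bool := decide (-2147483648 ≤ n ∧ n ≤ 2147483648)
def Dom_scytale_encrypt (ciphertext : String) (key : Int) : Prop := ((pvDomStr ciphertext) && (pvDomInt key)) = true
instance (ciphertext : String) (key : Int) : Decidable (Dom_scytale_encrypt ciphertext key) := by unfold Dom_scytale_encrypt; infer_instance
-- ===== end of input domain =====

-- B replaces A's key×n matrix construction by the closed-form permutation
-- index (col % key) * q + min (col % key, n % key) + col // key, one pass over the text.

-- ===== PORT A =====
def scytale_encrypt (ciphertext : String) (key : Int) : String :=
  let cs := ciphertext.toList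
  let scytale0 : List (List Char) :=
    (PySem.List.pyRange 0 key).map (fun _ => cs.map (fun _ => '\n'))
  let scytale1 :=
    (PySem.List.pyRange 0 (PySem.Str.len ciphertext)).foldl
      (fun m col =>
        PySem.List.pySetD m (PySem.Int.mod col key)
          (PySem.List.pySetD (PySem.List.pyGetD m (PySem.Int.mod col key) []) col '*')) scytale0
  let st :=
    (PySem.List.pyRange 0 key).foldl
      (fun (st : List (List Char) × Int) i =>
        (PySem.List.pyRange 0 (PySem.Str.len ciphertext)).foldl
          (fun (st : List (List Char) × Int) j =>
            if PySem.List.pyGetD (PySem.List.pyGetD st.1 i []) j ' ' = '*' ∧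
                st.2 < PySem.Str.len ciphertext then
              (PySem.List.pySetD st.1 i
                (PySem.List.pySetD (PySem.List.pyGetD st.1 i []) j
                  (PySem.List.pyGetD cs st.2 ' ')),
               st.2 + 1)
            else st) st) (scytale1, (0 : Int))
  String.ofList ((PySem.List.pyRange 0 (PySem.Str.len ciphertext)).map
    (fun col => PySem.List.pyGetD (PySem.List.pyGetD st.1 (PySem.Int.mod col key) []) col ' '))

-- ===== PORT B =====
def scytale_encrypt_alt (ciphertext : String) (key : Int) : String :=
  let cs := ciphertext.toList
  let n := PySem.Str.len ciphertext
  if n = 0 then "" else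
  let q := PySem.Int.floordiv n key
  let r := PySem.Int.mod n key
  String.ofList ((PySem.List.pyRange 0 n).map (fun col =>
    let i := PySem.Int.mod col key
    PySem.List.pyGetD cs (i * q + min i r + PySem.Int.floordiv col key) ' '))

-- ===== PRECONDITION & SPEC =====
-- Pre_ excludes exactly the inputs where A raises: key ≤ 0 with nonempty text
-- (ZeroDivisionError for key = 0, IndexError for key < 0).
def Pre_scytale_encrypt (ciphertext : String) (key : Int) : Prop := 1 ≤ key ∨ ciphertext = ""
instance (ciphertext : String) (key : Int) : Decidable (Pre_scytale_encrypt ciphertext key) := by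
  unfold Pre_scytale_encrypt; infer_instance

def pvWitness_scytale_encrypt : String × Int := ("HELLOWORLD", 3)

def Spec_scytale_encrypt (ciphertext : String) (key : Int) (out : String) : Prop := out = scytale_encrypt_alt ciphertext key
instance (ciphertext : String) (key : Int) (out : String) : Decidable (Spec_scytale_encrypt ciphertext key out) := by unfold Spec_scytale_encrypt; infer_instance

-- ===== CLAIM (what is proved, stated in full; the proofs are below) =====
def Claim_equal_scytale_encrypt : Prop := ∀ (ciphertext : String) (key : Int), Dom_scytale_encrypt ciphertext key → Pre_scytale_encrypt ciphertext key → Spec_scytale_encrypt ciphertext key (scytale_encrypt ciphertext key)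

-- ===== LEMMAS AND PROOFS =====

def pvMat (K N : Nat) (f : Nat → Nat → Char) : List (List Char) :=
  (List.range K).map (fun i => (List.range N).map (f i))

theorem pvMat_congr {K N : Nat} {f g : Nat → Nat → Char}
    (h : ∀ i, i < K → ∀ j, j < N → f i j = g i j) : pvMat K N f = pvMat K N g := by
  unfold pvMat
  refine List.map_congr_left (fun i hi => ?_)
  exact List.map_congr_left (fun j hj => h i (List.mem_range.mp hi) j (List.mem_range.mp hj))

theorem pvMat_row {K N : Nat} {f : Nat → Nat → Char} {i : Nat} (hi : i < K) :
    PySem.List.pyGetD (pvMat K N f) (i : Int) [] = (List.range N).map (f i) := by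
  rw [PySem.List.pyGetD_natCast]
  simp [pvMat, List.getD, hi]

theorem pvMat_entry {K N : Nat} {f : Nat → Nat → Char} {i j : Nat} (hi : i < K) (hj : j < N) (d : Char) :
    PySem.List.pyGetD (PySem.List.pyGetD (pvMat K N f) (i : Int) []) (j : Int) d = f i j := by
  rw [pvMat_row hi, PySem.List.pyGetD_natCast]
  simp [List.getD, hj]

theorem pvMat_set {K N : Nat} {f : Nat → Nat → Char} {i j : Nat} (hi : i < K) (_hj : j < N) (c : Char) :
    PySem.List.pySetD (pvMat K N f) (i : Int)
      (PySem.List.pySetD (PySem.List.pyGetD (pvMat K N f) (i : Int) []) (j : Int) c)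
    = pvMat K N (fun i' j' => if i' = i ∧ j' = j then c else f i' j') := by
  rw [pvMat_row hi, PySem.List.pySetD_natCast, PySem.List.pySetD_natCast]
  apply List.ext_getElem
  · simp [pvMat]
  intro a h1 h2
  simp only [pvMat, List.length_map, List.length_range] at h1 h2 ⊢
  rw [List.getElem_set]
  by_cases ha : i = a
  · subst ha
    simp only [List.getElem_map, List.getElem_range, if_true, true_and]
    apply List.ext_getElem
    · simp
    intro b hb1 hb2
    simp only [List.length_map, List.length_range] at hb1 hb2
    rw [List.getElem_set]
    by_cases hbj : j = b
    · subst hbj; simp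
    · simp [hbj, Ne.symm hbj]
  · simp only [if_neg ha, List.getElem_map, List.getElem_range]
    apply List.map_congr_left
    intro b hb
    simp [Ne.symm ha]
def pvCnt (K i j : Nat) : Nat := (List.range j).countP (fun j' => j' % K = i)
def pvOff (K N i : Nat) : Nat := i * (N / K) + min i (N % K)

theorem pvCnt_succ (K i m : Nat) :
    pvCnt K i (m + 1) = pvCnt K i m + if m % K = i then 1 else 0 := by
  simp [pvCnt, List.range_succ, List.countP_append, List.countP_cons]

theorem pvSuccDivMod {K : Nat} (hK : 0 < K) (j : Nat) :
    (j % K + 1 = K → (j + 1) / K = j / K + 1 ∧ (j + 1) % K = 0) ∧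
    (j % K + 1 < K → (j + 1) / K = j / K ∧ (j + 1) % K = j % K + 1) := by
  constructor
  · intro h
    have hj : j + 1 = K * (j / K) + K := by
      have := Nat.div_add_mod j K; omega
    rw [hj]
    constructor
    · rw [show K * (j / K) + K = K * (j / K + 1) by ring, Nat.mul_div_cancel_left _ hK]
    · rw [show K * (j / K) + K = K * (j / K + 1) by ring]; exact Nat.mul_mod_right K _
  · intro h
    have hj : j + 1 = K * (j / K) + (j % K + 1) := by
      have := Nat.div_add_mod j K; omega
    rw [hj]
    constructor
    · rw [Nat.mul_add_div hK, Nat.div_eq_of_lt h]; omega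

    · rw [Nat.mul_add_mod, Nat.mod_eq_of_lt h]

theorem pvCnt_closed {K : Nat} (hK : 0 < K) {i : Nat} (hi : i < K) (j : Nat) :
    pvCnt K i j = j / K + if i < j % K then 1 else 0 := by
  induction j with
  | zero => simp [pvCnt]
  | succ j ih =>
    rw [pvCnt_succ, ih]
    have hmod := Nat.mod_lt j hK
    rcases Nat.lt_or_ge (j % K + 1) K with h | h
    · have := (pvSuccDivMod hK j).2 h
      rw [this.1, this.2]
      split_ifs <;> omega
    · have hk : j % K + 1 = K := by omega
      have := (pvSuccDivMod hK j).1 hk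
      rw [this.1, this.2]
      split_ifs <;> omega

theorem pvCnt_self {K : Nat} (hK : 0 < K) (j : Nat) : pvCnt K (j % K) j = j / K := by
  rw [pvCnt_closed hK (Nat.mod_lt j hK) j]
  simp

theorem pvOff_succ {K N i : Nat} (hK : 0 < K) (hi : i < K) :
    pvOff K N (i + 1) = pvOff K N i + pvCnt K i N := by
  rw [pvCnt_closed hK hi N]
  unfold pvOff
  rw [Nat.succ_mul]
  have hr : N % K < K := Nat.mod_lt N hK
  split_ifs <;> omega

theorem pvOff_last {K N : Nat} (hK : 0 < K) : pvOff K N K = N := by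
  unfold pvOff
  have hr : N % K < K := Nat.mod_lt N hK
  have := Nat.div_add_mod N K
  have : K * (N / K) = N / K * K := Nat.mul_comm _ _
  omega

theorem pvOff_mono {K N i : Nat} (hK : 0 < K) (hi : i ≤ K) : pvOff K N i ≤ N := by
  have := pvOff_last (N := N) hK
  unfold pvOff at *
  have h1 : i * (N / K) ≤ K * (N / K) := Nat.mul_le_mul_right _ hi
  have hr : N % K < K := Nat.mod_lt N hK
  omega

theorem pvIdx_lt {K N m : Nat} (hK : 0 < K) (hm : m < N) :
    pvOff K N (m % K) + pvCnt K (m % K) m < N := by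
  have hmk : m % K < K := Nat.mod_lt m hK
  have h1 : pvCnt K (m % K) (m + 1) = pvCnt K (m % K) m + 1 := by
    rw [pvCnt_succ]; simp
  have h2 : pvCnt K (m % K) (m + 1) ≤ pvCnt K (m % K) N := by
    unfold pvCnt
    exact (List.range_sublist.mpr hm).countP_le
  have h3 := pvOff_succ (N := N) hK hmk
  have h4 := pvOff_mono (N := N) (i := m % K + 1) hK (by omega)
  omega


def pvSt (cs : List Char) (K i m : Nat) : List (List Char) × Int :=
  (pvMat K cs.length (fun i' j' =>
      if j' % K = i' ∧ (i' < i ∨ (i' = i ∧ j' < m)) then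
        cs.getD (pvOff K cs.length i' + pvCnt K i' j') ' '
      else if j' % K = i' then '*' else '\n'),
   ((pvOff K cs.length i + pvCnt K i m : Nat) : Int))

theorem pvPhase1 {cs : List Char} {K : Nat} (hK : 0 < K) {m : Nat} (hm : m ≤ cs.length) :
    (List.range m).foldl
      (fun M (c : Nat) =>
        PySem.List.pySetD M ((c % K : Nat) : Int)
          (PySem.List.pySetD (PySem.List.pyGetD M ((c % K : Nat) : Int) []) (c : Int) '*'))
      (pvMat K cs.length (fun _ _ => '\n'))
    = pvMat K cs.length (fun i j => if j < m ∧ j % K = i then '*' else '\n') := by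
  induction m with
  | zero => simp
  | succ m ih =>
    rw [List.range_succ, List.foldl_append, ih (by omega)]
    simp only [List.foldl_cons, List.foldl_nil]
    rw [pvMat_set (Nat.mod_lt m hK) (by omega)]
    apply pvMat_congr
    intro i hi j hj
    rcases eq_or_ne j m with h | h <;> rcases eq_or_ne i (m % K) with h2 | h2 <;>
      (subst_vars; split_ifs <;> first | rfl | (exfalso; omega))

theorem pvPhase2Inner {cs : List Char} {K : Nat} (hK : 0 < K) {i : Nat} (hi : i < K)
    {m : Nat} (hm : m ≤ cs.length) :
    (List.range m).foldl
      (fun (st : List (List Char) × Int) (j : Nat) =>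
        if PySem.List.pyGetD (PySem.List.pyGetD st.1 (i : Int) []) (j : Int) ' ' = '*' ∧
            st.2 < (cs.length : Int) then
          (PySem.List.pySetD st.1 (i : Int)
            (PySem.List.pySetD (PySem.List.pyGetD st.1 (i : Int) []) (j : Int)
              (PySem.List.pyGetD cs st.2 ' ')),
           st.2 + 1)
        else st) (pvSt cs K i 0)
    = pvSt cs K i m := by
  induction m with
  | zero => simp
  | succ m ih =>
    rw [List.range_succ, List.foldl_append, ih (by omega)]
    simp only [List.foldl_cons, List.foldl_nil]
    have hmN : m < cs.length := by omega
    have hentry := pvMat_entry (N := cs.length)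
      (f := fun i' j' =>
        if j' % K = i' ∧ (i' < i ∨ (i' = i ∧ j' < m)) then
          cs.getD (pvOff K cs.length i' + pvCnt K i' j') ' '
        else if j' % K = i' then '*' else '\n') hi hmN ' '
    by_cases h : m % K = i
    · -- the entry is a star and the index is in range: fill it
      have hstar : (pvSt cs K i m).1 = pvMat K cs.length _ := rfl
      have hcond : PySem.List.pyGetD (PySem.List.pyGetD (pvSt cs K i m).1 (i : Int) []) (m : Int) ' ' = '*' := by
        rw [hstar, hentry]
        simp [h]
      have hidx : (pvSt cs K i m).2 < (cs.length : Int) := by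
        have : pvOff K cs.length i + pvCnt K i m < cs.length := by
          have := pvIdx_lt (K := K) hK hmN
          rwa [h] at this
        simp only [pvSt]
        exact_mod_cast this
      rw [if_pos ⟨hcond, hidx⟩]
      show (_, _) = pvSt cs K i (m + 1)
      simp only [pvSt] at *
      rw [pvMat_set hi hmN, PySem.List.pyGetD_natCast]
      simp only [Prod.mk.injEq]
      refine ⟨?_, ?_⟩
      · apply pvMat_congr
        intro i' hi' j hj
        rcases eq_or_ne j m with hj2 | hj2 <;> rcases eq_or_ne i' i with h2 | h2 <;>
          (subst_vars; split_ifs <;> first | rfl | (exfalso; omega))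
      · rw [pvCnt_succ, if_pos h]
        push_cast
        ring
    · -- not this row's column: no-op
      have hcond : ¬ (PySem.List.pyGetD (PySem.List.pyGetD (pvSt cs K i m).1 (i : Int) []) (m : Int) ' ' = '*' ∧
          (pvSt cs K i m).2 < (cs.length : Int)) := by
        rintro ⟨hc, -⟩
        rw [show (pvSt cs K i m).1 = pvMat K cs.length _ from rfl, hentry] at hc
        simp [h] at hc
      rw [if_neg hcond]
      simp only [pvSt]
      rw [pvCnt_succ, if_neg h]
      simp only [Prod.mk.injEq]
      refine ⟨?_, ?_⟩
      · apply pvMat_congr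
        intro i' hi' j hj
        rcases eq_or_ne j m with hj2 | hj2 <;> rcases eq_or_ne i' i with h2 | h2 <;>
          (subst_vars; split_ifs <;> first | rfl | (exfalso; omega))
      · norm_num

theorem pvStep (cs : List Char) {K : Nat} (hK : 0 < K) {i : Nat} (hi : i < K) :
    pvSt cs K i cs.length = pvSt cs K (i + 1) 0 := by
  simp only [pvSt, Prod.mk.injEq]
  refine ⟨?_, ?_⟩
  · apply pvMat_congr
    intro i' hi' j hj
    split_ifs <;> first | rfl | (exfalso; omega)
  · rw [pvOff_succ hK hi]
    simp [pvCnt]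

theorem pvPhase2 {cs : List Char} {K : Nat} (hK : 0 < K) {i : Nat} (hi : i ≤ K) :
    (List.range i).foldl
      (fun (st : List (List Char) × Int) (i' : Nat) =>
        (List.range cs.length).foldl
          (fun (st : List (List Char) × Int) (j : Nat) =>
            if PySem.List.pyGetD (PySem.List.pyGetD st.1 (i' : Int) []) (j : Int) ' ' = '*' ∧
                st.2 < (cs.length : Int) then
              (PySem.List.pySetD st.1 (i' : Int)
                (PySem.List.pySetD (PySem.List.pyGetD st.1 (i' : Int) []) (j : Int)
                  (PySem.List.pyGetD cs st.2 ' ')),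
               st.2 + 1)
            else st) st)
      (pvSt cs K 0 0)
    = pvSt cs K i 0 := by
  induction i with
  | zero => simp
  | succ i ih =>
    rw [List.range_succ, List.foldl_append, ih (by omega)]
    simp only [List.foldl_cons, List.foldl_nil]
    rw [pvPhase2Inner hK (by omega) (le_refl cs.length), pvStep cs hK (by omega)]


theorem pvPhase1' (cs : List Char) (key : Int) (K : Nat) (hkey : key = (K : Int)) (hK : 0 < K)
    (n : Int) (hn : n = (cs.length : Int)) :
    (PySem.List.pyRange 0 n).foldl
      (fun m col =>
        PySem.List.pySetD m (PySem.Int.mod col key)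
          (PySem.List.pySetD (PySem.List.pyGetD m (PySem.Int.mod col key) []) col '*'))
      ((PySem.List.pyRange 0 key).map (fun _ => cs.map (fun _ => '\n')))
    = pvMat K cs.length (fun i j => if j < cs.length ∧ j % K = i then '*' else '\n') := by
  subst hkey hn
  simp only [PySem.List.pyRange_zero_nat, List.foldl_map, List.map_map,
    PySem.Int.mod_natCast, Function.comp_def]
  have hinit0 : List.map (fun _ => List.map (fun _ => '\n') cs) (List.range K)
      = pvMat K cs.length (fun _ _ => '\n') := by
    simp [pvMat, List.map_const']
  rw [hinit0]
  exact pvPhase1 hK (le_refl cs.length)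

theorem pvPhase2' (cs : List Char) (key : Int) (K : Nat) (hkey : key = (K : Int)) (hK : 0 < K)
    (n : Int) (hn : n = (cs.length : Int)) :
    (PySem.List.pyRange 0 key).foldl
      (fun (st : List (List Char) × Int) i =>
        (PySem.List.pyRange 0 n).foldl
          (fun (st : List (List Char) × Int) j =>
            if PySem.List.pyGetD (PySem.List.pyGetD st.1 i []) j ' ' = '*' ∧ st.2 < n then
              (PySem.List.pySetD st.1 i
                (PySem.List.pySetD (PySem.List.pyGetD st.1 i []) j
                  (PySem.List.pyGetD cs st.2 ' ')),
               st.2 + 1)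
            else st) st)
      ((pvMat K cs.length (fun i j => if j < cs.length ∧ j % K = i then '*' else '\n')), (0 : Int))
    = pvSt cs K K 0 := by
  subst hkey hn
  have hinit : ((pvMat K cs.length fun i j => if j < cs.length ∧ j % K = i then '*' else '\n'),
      (0 : Int)) = pvSt cs K 0 0 := by
    simp only [pvSt, Prod.mk.injEq]
    refine ⟨pvMat_congr ?_, by simp [pvOff, pvCnt]⟩
    intro i hi j hj
    split_ifs <;> first | rfl | (exfalso; omega)
  rw [hinit]
  simp only [PySem.List.pyRange_zero_nat, List.foldl_map]
  exact pvPhase2 (cs := cs) hK (le_refl K)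

theorem pvMain (c : String) (key : Int) (hkey : 1 ≤ key) (hN : c.toList.length ≠ 0) :
    scytale_encrypt c key = scytale_encrypt_alt c key := by
  obtain ⟨K, rfl⟩ : ∃ K : Nat, key = (K : Int) := ⟨key.toNat, by omega⟩
  have hK : 0 < K := by exact_mod_cast hkey
  simp only [scytale_encrypt, scytale_encrypt_alt]
  rw [pvPhase1' c.toList (K : Int) K rfl hK _ (PySem.Str.len_eq c),
    pvPhase2' c.toList (K : Int) K rfl hK _ (PySem.Str.len_eq c),
    if_neg (by rw [PySem.Str.len_eq]; exact_mod_cast hN)]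
  simp only [PySem.Str.len_eq, PySem.List.pyRange_zero_nat, List.map_map,
    PySem.Int.mod_natCast, PySem.Int.floordiv_natCast, Function.comp_def]
  apply congrArg String.ofList
  apply List.map_congr_left
  intro k hk
  have hkN : k < c.toList.length := List.mem_range.mp hk
  have hkK : k % K < K := Nat.mod_lt k hK
  simp only [pvSt]
  rw [pvMat_entry hkK hkN]
  have hcast : (↑(k % K) : Int) * ↑(c.toList.length / K) + min (↑(k % K) : Int) ↑(c.toList.length % K)
      + ((k / K : Nat) : Int)
      = ((k % K * (c.toList.length / K) + min (k % K) (c.toList.length % K) + k / K : Nat) : Int) := by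
    push_cast
    ring
  rw [hcast, PySem.List.pyGetD_natCast]
  rw [if_pos ⟨rfl, Or.inl hkK⟩]
  rw [pvCnt_self hK]
  simp [pvOff, List.getD]

-- ===== VERDICT (by name: the statement is the Claim_ definition above) =====
theorem scytale_encrypt_spec : Claim_equal_scytale_encrypt := by
  intro c key _ hpre
  unfold Spec_scytale_encrypt
  by_cases hN : c.toList.length = 0
  · have hc : c.toList = [] := List.length_eq_zero_iff.mp hN
    simp [scytale_encrypt, scytale_encrypt_alt, PySem.Str.len_eq, hc]
  · have hkey : 1 ≤ key := by
      rcases hpre with h | h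
      · exact h
      · exfalso; rw [h] at hN; exact hN rfl
    exact pvMain c key hkey hN
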